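-- pv_equiv track=rewrite | github.com/ypchan/autotax2 | src/orientation.py | kmer_set
-- ===== SOURCE A (Python) =====
-- def normalize_sequence(sequence: str) -> str:
--     return (
--         "".join(str(sequence).split())
--         .replace("-", "")
--         .replace(".", "")
--         .upper()
--         .replace("U", "T")
--     )
--
-- def kmer_set(sequence: str, k: int) -> set[str]:
--     sequence = normalize_sequence(sequence)
--
--     if len(sequence) < k:
--         return {sequence} if sequence else set()
--
--     return {
--         sequence[i:i + k]
--         for i in range(0, len(sequence) - k + 1)
--         if "N" not in sequence[i:i + k]
--     }
-- ===== SOURCE B (Python) =====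
-- def normalize_sequence(sequence: str) -> str:
--     return (
--         "".join(str(sequence).split())
--         .replace("-", "")
--         .replace(".", "")
--         .upper()
--         .replace("U", "T")
--     )
--
-- def kmer_set(sequence: str, k: int) -> set[str]:
--     s = normalize_sequence(sequence)
--
--     result = set()
--     if len(s) < k:
--         if s:
--             result.add(s)
--         return result
--
--     run = 0
--     for i, c in enumerate(s):
--         run = 0 if c == "N" else run + 1
--         if run >= k:
--             result.add(s[i + 1 - k:i + 1])
--     return result
-- ===== Notes on version B (the rewrite author's own statement) =====
-- stated objective: alternative
-- what changed: B replaces A's build-every-window-and-substring-search-for-'N' comprehension by a single left-to-right pass with a run-length counter of consecutive non-N characters, emitting the window ending at position i exactly when the run reaches k, so no window is ever materialised just to be discarded.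
-- outside the precondition, e.g. on kmer_set('NGTA', -2): A returns {'', 'GT'}, B returns {''}
import Mathlib
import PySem

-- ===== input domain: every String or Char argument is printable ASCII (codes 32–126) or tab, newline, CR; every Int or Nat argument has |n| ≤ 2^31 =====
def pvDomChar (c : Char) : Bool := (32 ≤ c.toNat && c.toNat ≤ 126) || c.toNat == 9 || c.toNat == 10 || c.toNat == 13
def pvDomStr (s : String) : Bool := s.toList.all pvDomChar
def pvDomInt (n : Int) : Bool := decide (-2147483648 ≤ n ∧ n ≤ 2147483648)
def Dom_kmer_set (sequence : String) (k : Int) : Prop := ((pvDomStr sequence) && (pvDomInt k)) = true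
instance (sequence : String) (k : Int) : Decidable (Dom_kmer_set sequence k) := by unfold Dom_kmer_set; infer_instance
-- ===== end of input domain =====

-- B replaces A's scan-every-window-and-substring-search comprehension by one pass with a run-length
-- counter of consecutive non-'N' characters, emitting the window ending at i when the run reaches k.

-- ===== PORT A =====
def normalize_sequence (sequence : String) : String :=
  PySem.Str.replace
    (PySem.Str.upper
      (PySem.Str.replace
        (PySem.Str.replace (PySem.Str.join "" (PySem.Str.split₀ sequence)) "-" "")
        "." ""))
    "U" "T"

def kmer_set (sequence : String) (k : Int) : List String :=
  let s := normalize_sequence sequence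
  if PySem.Str.len s < k then
    (if s ≠ "" then [s] else [])
  else
    PySem.Set.ofList
      ((PySem.List.pyRange 0 (PySem.Str.len s - k + 1) 1).filterMap
        (fun i =>
          if PySem.Str.isIn "N" (PySem.Str.slice s (some i) (some (i + k))) then none
          else some (PySem.Str.slice s (some i) (some (i + k)))))

-- ===== PORT B =====
def kmer_set_alt (sequence : String) (k : Int) : List String :=
  let s := normalize_sequence sequence
  if PySem.Str.len s < k then
    (if s ≠ "" then PySem.Set.add PySem.Set.empty s else PySem.Set.empty)
  else
    ((PySem.List.enumerate s.toList 0).foldl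
      (fun (st : PySem.Set String × Int) p =>
        let run : Int := if p.2 = 'N' then 0 else st.2 + 1
        (if k ≤ run then
           PySem.Set.add st.1 (PySem.Str.slice s (some (p.1 + 1 - k)) (some (p.1 + 1)))
         else st.1,
         run))
      (PySem.Set.empty, 0)).1

-- ===== PRECONDITION & SPEC =====
-- Pre_ excludes non-positive k (outside the natural k-mer domain): there Python's negative slice
-- endpoints wrap around, so both A and B return accidental sets of substrings nobody would specify.
def Pre_kmer_set (sequence : String) (k : Int) : Prop := 1 ≤ k
instance (sequence : String) (k : Int) : Decidable (Pre_kmer_set sequence k) := by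
  unfold Pre_kmer_set; infer_instance

def pvWitness_kmer_set : String × Int := ("ACGTNAC", 2)

def Spec_kmer_set (sequence : String) (k : Int) (out : List String) : Prop :=
  out = kmer_set_alt sequence k
instance (sequence : String) (k : Int) (out : List String) : Decidable (Spec_kmer_set sequence k out) := by
  unfold Spec_kmer_set; infer_instance

-- ===== CLAIM (what is proved, stated in full; the proofs are below) =====
def Claim_equal_kmer_set : Prop :=
  ∀ (sequence : String) (k : Int), Dom_kmer_set sequence k → Pre_kmer_set sequence k →
    Spec_kmer_set sequence k (kmer_set sequence k)

-- ===== LEMMAS AND PROOFS =====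

-- every k-window of cs, in left-to-right order (empty when cs is shorter than K ≥ 1)
def winsL (K : Nat) (cs : List Char) : List (List Char) :=
  (List.range (cs.length + 1 - K)).map (fun i => (cs.drop i).take K)

def nfree (w : List Char) : Bool := !(decide ('N' ∈ w))

-- length of the maximal N-free suffix (what B's 'run' counter holds)
def nfSuffix (cs : List Char) : Nat :=
  (cs.reverse.takeWhile (fun c => !(c == 'N'))).length

theorem nfree_take_iff :
    ∀ (cs : List Char) (m : Nat),
      (m ≤ cs.length ∧ 'N' ∉ cs.take m) ↔
        m ≤ (cs.takeWhile (fun c => !(c == 'N'))).length := by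
  intro cs
  induction cs with
  | nil => intro m; simp
  | cons c cs ih =>
    intro m
    cases m with
    | zero => simp
    | succ m =>
      by_cases hc : c = 'N'
      · subst hc
        rw [List.takeWhile_cons_of_neg (by simp)]
        simp
      · rw [List.takeWhile_cons_of_pos (by simp [hc])]
        simp only [List.length_cons, Nat.add_le_add_iff_right, List.take_succ_cons,
          List.mem_cons, not_or]
        constructor
        · rintro ⟨h1, h2, h3⟩; exact (ih m).mp ⟨h1, h3⟩
        · intro h
          obtain ⟨h1, h2⟩ := (ih m).mpr h
          exact ⟨h1, fun he => hc he.symm, h2⟩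

theorem nfSuffix_le (cs : List Char) : nfSuffix cs ≤ cs.length := by
  have h := (List.takeWhile_prefix (l := cs.reverse) (p := fun c => !(c == 'N'))).length_le
  simpa [nfSuffix] using h

theorem nfSuffix_snoc (xs : List Char) (x : Char) :
    nfSuffix (xs ++ [x]) = if x = 'N' then 0 else nfSuffix xs + 1 := by
  unfold nfSuffix
  rw [List.reverse_append]
  by_cases hx : x = 'N'
  · subst hx
    rw [if_pos rfl]
    simp [List.takeWhile_cons_of_neg]
  · rw [if_neg hx]
    simp only [List.reverse_singleton, List.singleton_append]
    rw [List.takeWhile_cons_of_pos (by simp [hx])]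
    simp

-- run ≥ K at the end of p ↔ the last K characters of p exist and are N-free
theorem nfSuffix_ge_iff (p : List Char) (K : Nat) :
    K ≤ nfSuffix p ↔ (K ≤ p.length ∧ 'N' ∉ p.drop (p.length - K)) := by
  by_cases hKp : K ≤ p.length
  · unfold nfSuffix
    rw [← nfree_take_iff p.reverse K]
    have hd : (p.drop (p.length - K)).reverse = p.reverse.take K := by
      rw [List.reverse_drop]
      congr 1
      omega
    constructor
    · rintro ⟨h1, h2⟩
      exact ⟨hKp, fun hm => h2 (by rw [← hd]; simpa using hm)⟩
    · rintro ⟨_, h2⟩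
      refine ⟨by simpa using hKp, fun hm => h2 ?_⟩
      have h3 : 'N' ∈ (p.drop (p.length - K)).reverse := by rw [hd]; exact hm
      simpa using h3
  · constructor
    · intro hge; exact absurd (le_trans hge (nfSuffix_le p)) hKp
    · rintro ⟨h1, _⟩; exact absurd h1 hKp

theorem winsL_nil (K : Nat) (hK : 1 ≤ K) : winsL K [] = [] := by
  unfold winsL
  have : 0 + 1 - K = 0 := by omega
  simp [this]

-- windows of xs ++ [x]: the windows of xs plus (when long enough) the one ending at x
theorem winsL_snoc (K : Nat) (hK : 1 ≤ K) (xs : List Char) (x : Char) :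
    winsL K (xs ++ [x]) =
      winsL K xs ++
        (if K ≤ xs.length + 1 then [((xs ++ [x]).drop (xs.length + 1 - K)).take K] else []) := by
  unfold winsL
  by_cases h : K ≤ xs.length + 1
  · rw [if_pos h]
    have hlen : (xs ++ [x]).length + 1 - K = (xs.length + 1 - K) + 1 := by
      simp only [List.length_append, List.length_singleton]; omega
    rw [hlen, List.range_succ, List.map_append, List.map_singleton]
    congr 1
    apply List.map_congr_left
    intro i hi
    have hi' : i < xs.length + 1 - K := List.mem_range.mp hi
    have hix : i ≤ xs.length := by omega
    rw [List.drop_append_of_le_length hix,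
      List.take_append_of_le_length (by simp [List.length_drop]; omega)]
  · rw [if_neg h]
    have h1 : (xs ++ [x]).length + 1 - K = 0 := by
      simp only [List.length_append, List.length_singleton]; omega
    have h2 : xs.length + 1 - K = 0 := by omega
    have h3 : xs.length + 1 + 1 - K = 0 := by omega
    simp [h2, h3]

-- the N-free windows of a prefix, as the strings A/B insert, in insertion order
def emitted (K : Nat) (l : List Char) : List String :=
  ((winsL K l).filter nfree).map String.ofList

theorem set_ofList_snoc {α : Type} [BEq α] (l : List α) (x : α) :
    PySem.Set.ofList (l ++ [x]) = PySem.Set.add (PySem.Set.ofList l) x := by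
  rw [PySem.Set.ofList_eq_foldl, PySem.Set.ofList_eq_foldl, List.foldl_append]
  rfl

-- B's loop invariant: having consumed the prefix xs of s, the state is
-- (set of N-free windows contained in xs, N-free run length of xs)
theorem foldB_inv (s : String) (K : Nat) (hK : 1 ≤ K) :
    ∀ (ys xs : List Char), xs ++ ys = s.toList →
      (PySem.List.enumerate ys (xs.length : Int)).foldl
        (fun (st : PySem.Set String × Int) p =>
          let run : Int := if p.2 = 'N' then 0 else st.2 + 1
          (if (K : Int) ≤ run then
             PySem.Set.add st.1
               (PySem.Str.slice s (some (p.1 + 1 - (K : Int))) (some (p.1 + 1)))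
           else st.1,
           run))
        (PySem.Set.ofList (emitted K xs), (nfSuffix xs : Int))
      = (PySem.Set.ofList (emitted K s.toList), (nfSuffix s.toList : Int)) := by
  intro ys
  induction ys with
  | nil =>
    intro xs h
    rw [List.append_nil] at h
    subst h
    rfl
  | cons y ys ih =>
    intro xs h
    rw [PySem.List.enumerate_cons, List.foldl_cons]
    have hprefix : (xs ++ [y]) ++ ys = s.toList := by simpa using h
    have hrun : (if y = 'N' then (0 : Int) else (nfSuffix xs : Int) + 1) =
        (nfSuffix (xs ++ [y]) : Int) := by
      rw [nfSuffix_snoc]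
      split_ifs <;> simp
    have hnfs_le : nfSuffix (xs ++ [y]) ≤ xs.length + 1 := by
      have h1 := nfSuffix_le (xs ++ [y])
      simpa using h1
    -- the window B adds at this step equals the last K chars of the prefix
    have hwin_eq : K ≤ xs.length + 1 →
        PySem.Str.slice s (some ((xs.length : Int) + 1 - (K : Int)))
            (some ((xs.length : Int) + 1)) =
          String.ofList (((xs ++ [y]).drop (xs.length + 1 - K)).take K) := by
      intro hKm
      have h1 : ((xs.length : Int) + 1 - (K : Int)) = ((xs.length + 1 - K : Nat) : Int) := by
        push_cast; omega
      have h2 : ((xs.length : Int) + 1) = ((xs.length + 1 : Nat) : Int) := by push_cast; ring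
      unfold PySem.Str.slice
      rw [h1, h2, PySem.Chars.slice_eq_listSlice, PySem.List.slice_natCast]
      have h3 : xs.length + 1 - (xs.length + 1 - K) = K := by omega
      rw [h3]
      congr 1
      rw [← hprefix, List.drop_append_of_le_length
          (by simp only [List.length_append, List.length_singleton]; omega),
        List.take_append_of_le_length
          (by simp only [List.length_drop, List.length_append, List.length_singleton]; omega)]
    -- the emitted list grows by the new window exactly when the run reaches K
    have hemit : emitted K (xs ++ [y]) =
        emitted K xs ++
          (if K ≤ nfSuffix (xs ++ [y]) then
            [String.ofList (((xs ++ [y]).drop (xs.length + 1 - K)).take K)] else []) := by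
      unfold emitted
      rw [winsL_snoc K hK, List.filter_append, List.map_append]
      congr 1
      have hiff := nfSuffix_ge_iff (xs ++ [y]) K
      rw [show (xs ++ [y]).length = xs.length + 1 by simp] at hiff
      by_cases hKm : K ≤ xs.length + 1
      · rw [if_pos hKm]
        have hKlen : ((xs ++ [y]).drop (xs.length + 1 - K)).length = K := by
          simp [List.length_drop]; omega
        have htake : ((xs ++ [y]).drop (xs.length + 1 - K)).take K =
            (xs ++ [y]).drop (xs.length + 1 - K) :=
          List.take_of_length_le (le_of_eq hKlen)
        by_cases hge : K ≤ nfSuffix (xs ++ [y])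
        · have hnotin := (hiff.mp hge).2
          have hnf : nfree (((xs ++ [y]).drop (xs.length + 1 - K)).take K) = true := by
            rw [htake]
            simp [nfree, hnotin]
          rw [if_pos hge]
          simp [hnf]
        · have hmem : 'N' ∈ (xs ++ [y]).drop (xs.length + 1 - K) := by
            by_contra hn
            exact hge (hiff.mpr ⟨hKm, hn⟩)
          have hnf : nfree (((xs ++ [y]).drop (xs.length + 1 - K)).take K) = false := by
            rw [htake]
            simp [nfree, hmem]
          rw [if_neg hge]
          simp [hnf]
      · rw [if_neg hKm, if_neg (fun hge => hKm (le_trans hge hnfs_le))]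
        rfl
    -- one step of the fold produces exactly the next invariant state
    refine Eq.trans ?_ (ih (xs ++ [y]) hprefix)
    show (PySem.List.enumerate ys ((xs.length : Int) + 1)).foldl _
        (if (K : Int) ≤ (if y = 'N' then (0 : Int) else (nfSuffix xs : Int) + 1) then
           PySem.Set.add (PySem.Set.ofList (emitted K xs))
             (PySem.Str.slice s (some ((xs.length : Int) + 1 - (K : Int)))
               (some ((xs.length : Int) + 1)))
         else PySem.Set.ofList (emitted K xs),
         (if y = 'N' then (0 : Int) else (nfSuffix xs : Int) + 1)) = _
    rw [hrun]
    congr 1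
    · refine Prod.ext ?_ rfl
      show (if (K : Int) ≤ (nfSuffix (xs ++ [y]) : Int) then
              PySem.Set.add (PySem.Set.ofList (emitted K xs))
                (PySem.Str.slice s (some ((xs.length : Int) + 1 - (K : Int)))
                  (some ((xs.length : Int) + 1)))
            else PySem.Set.ofList (emitted K xs)) =
          PySem.Set.ofList (emitted K (xs ++ [y]))
      rw [hemit]
      by_cases hge : K ≤ nfSuffix (xs ++ [y])
      · have hKm : K ≤ xs.length + 1 := le_trans hge hnfs_le
        rw [if_pos (show (K : Int) ≤ (nfSuffix (xs ++ [y]) : Int) from by exact_mod_cast hge),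
          if_pos hge, hwin_eq hKm, set_ofList_snoc]
      · rw [if_neg (fun hc => hge (by exact_mod_cast hc)), if_neg hge, List.append_nil]
    · congr 1
      simp

-- ---- bridge from port A's expression to the same emitted list ----

theorem slice_win (s : String) (j K : Nat) :
    PySem.Str.slice s (some ((0 : Int) + (j : Int))) (some ((0 : Int) + (j : Int) + (K : Int))) =
      String.ofList ((s.toList.drop j).take K) := by
  unfold PySem.Str.slice
  rw [PySem.Chars.slice_eq_listSlice, zero_add, PySem.List.slice_natCast_add]

theorem isIn_N (w : String) : PySem.Str.isIn "N" w = true ↔ 'N' ∈ w.toList := by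
  rw [PySem.Str.isIn_eq]
  have h : ("N" : String).toList = ['N'] := rfl
  rw [h, PySem.Chars.isIn_iff_infix]
  constructor
  · intro hinf; exact hinf.mem (by simp)
  · intro hm
    obtain ⟨a, b, hab⟩ := List.append_of_mem hm
    exact ⟨a, b, by rw [hab]; simp⟩

theorem filterMap_nfree (l : List Nat) (f : Nat → List Char) :
    l.filterMap (fun j => if 'N' ∈ f j then none else some (String.ofList (f j))) =
      ((l.map f).filter nfree).map String.ofList := by
  induction l with
  | nil => simp
  | cons j l ih =>
    simp only [List.filterMap_cons, List.map_cons, List.filter_cons]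
    by_cases hmem : 'N' ∈ f j
    · simp [hmem, nfree, ih]
    · simp [hmem, nfree, ih]

theorem a_list (s : String) (K : Nat) :
    ((PySem.List.pyRange 0 (PySem.Str.len s - (K : Int) + 1) 1).filterMap
      (fun i =>
        if PySem.Str.isIn "N" (PySem.Str.slice s (some i) (some (i + (K : Int)))) then none
        else some (PySem.Str.slice s (some i) (some (i + (K : Int)))))) =
      emitted K s.toList := by
  rw [PySem.List.pyRange_one]
  have hb : ((PySem.Str.len s - (K : Int) + 1) - 0).toNat = s.toList.length + 1 - K := by
    simp only [PySem.Str.len]; omega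
  rw [hb, List.filterMap_map]
  rw [List.filterMap_congr
    (g := fun j => if 'N' ∈ (s.toList.drop j).take K then none
                   else some (String.ofList ((s.toList.drop j).take K)))
    ?_]
  · rw [filterMap_nfree]
    rfl
  · intro j _
    simp only [Function.comp]
    rw [slice_win]
    by_cases hmem : 'N' ∈ (s.toList.drop j).take K
    · rw [if_pos ((isIn_N _).mpr (by simpa using hmem)), if_pos hmem]
    · rw [if_neg (fun h => hmem (by simpa using (isIn_N _).mp h)), if_neg hmem]

-- ===== VERDICT (by name: the statement is the Claim_ definition above) =====
set_option maxHeartbeats 1000000 in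
theorem kmer_set_spec : Claim_equal_kmer_set := by
  intro sequence k _ hpre
  unfold Spec_kmer_set kmer_set kmer_set_alt
  by_cases hlt : PySem.Str.len (normalize_sequence sequence) < k
  · simp only [hlt, if_true]
    split_ifs <;> rfl
  · simp only [hlt, if_false]
    have hk : k = ((k.toNat : Int)) := by
      have h1 : (1 : Int) ≤ k := hpre
      omega
    rw [hk]
    set K := k.toNat
    have hK1 : 1 ≤ K := by
      have h1 : (1 : Int) ≤ k := hpre
      omega
    set s := normalize_sequence sequence
    rw [a_list _ K]
    have h0 := foldB_inv s K hK1 s.toList [] (List.nil_append _)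
    simp only [List.length_nil, Nat.cast_zero] at h0
    have hinit : PySem.Set.ofList (emitted K ([] : List Char)) = PySem.Set.empty := by
      unfold emitted
      rw [winsL_nil K hK1]
      rfl
    have hnf0 : ((nfSuffix ([] : List Char)) : Int) = 0 := rfl
    rw [hinit, hnf0] at h0
    rw [h0]
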